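-- pv_equiv track=rewrite | github.com/NatalieWongg/ai-vs-human-classifier | ai_vs_human/ai_samples/ai29.py | longest_zero_path
-- ===== SOURCE A (Python) =====
-- def longest_zero_path(grid):
--     rows = len(grid)
--     cols = len(grid[0])
--     max_length = 0
--
--     # Check horizontal sequences
--     for row in grid:
--         count = 0
--         for val in row:
--             if val == 0:
--                 count += 1
--                 max_length = max(max_length, count)
--             else:
--                 count = 0
--
--     # Check vertical sequences
--     for col in range(cols):
--         count = 0
--         for row in range(rows):
--             if grid[row][col] == 0:
--                 count += 1
--                 max_length = max(max_length, count)
--             else: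
--                 count = 0
--
--     return max_length
-- ===== SOURCE B (Python) =====
-- def longest_zero_path(grid):
--     def max_gap(line):
--         idxs = [-1] + [i for i, v in enumerate(line) if v != 0] + [len(line)]
--         return max(b - a - 1 for a, b in zip(idxs, idxs[1:]))
--     best = max(max_gap(row) for row in grid)
--     for c in range(len(grid[0])):
--         best = max(best, max_gap([row[c] for row in grid]))
--     return best
-- ===== Notes on version B (the rewrite author's own statement) =====
-- stated objective: alternative
-- what changed: B abandons A's running run-length counters entirely: each line's longest zero run is computed as the maximum gap between consecutive nonzero positions (index list with sentinels -1 and len), then the answer is the max of these per-row and per-column values.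
import Mathlib
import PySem

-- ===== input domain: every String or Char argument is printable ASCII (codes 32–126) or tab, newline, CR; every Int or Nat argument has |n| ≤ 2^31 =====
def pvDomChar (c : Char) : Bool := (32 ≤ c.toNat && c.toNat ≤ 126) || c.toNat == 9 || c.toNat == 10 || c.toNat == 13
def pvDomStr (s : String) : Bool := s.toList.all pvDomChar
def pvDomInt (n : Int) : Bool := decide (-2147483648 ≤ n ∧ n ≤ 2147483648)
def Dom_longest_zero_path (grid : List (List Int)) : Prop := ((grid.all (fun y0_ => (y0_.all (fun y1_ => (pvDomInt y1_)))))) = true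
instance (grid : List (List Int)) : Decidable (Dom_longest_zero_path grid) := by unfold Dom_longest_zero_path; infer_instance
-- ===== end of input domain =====

-- B replaces A's run-length counters entirely: each line's longest zero run is computed as the
-- maximum gap between consecutive nonzero positions (with sentinels -1 and len); alternative algorithm.

-- ===== PORT A =====
def longest_zero_path (grid : List (List Int)) : Int :=
  let rows : Int := grid.length
  let cols : Int := (PySem.List.pyGetD grid 0 []).length
  let m1 : Int := grid.foldl (fun m row =>
      (row.foldl (fun (s : Int × Int) v =>
        if v = 0 then (s.1 + 1, max s.2 (s.1 + 1)) else (0, s.2)) ((0 : Int), m)).2) 0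
  (PySem.List.pyRange 0 cols 1).foldl (fun m col =>
      ((PySem.List.pyRange 0 rows 1).foldl (fun (s : Int × Int) r =>
        if PySem.List.pyGetD (PySem.List.pyGetD grid r []) col 0 = 0
        then (s.1 + 1, max s.2 (s.1 + 1)) else (0, s.2)) ((0 : Int), m)).2) m1

-- ===== PORT B =====
-- max_gap(line): indices of the nonzero entries with sentinels -1 and len(line); the answer is
-- the largest b - a - 1 over consecutive index pairs. The pair list always has ≥ 1 element
-- (idxs has ≥ 2), so the .getD 0 default for Python's max() is unreachable.
def maxGapLine (line : List Int) : Int :=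
  let idxs : List Int :=
    [-1] ++ ((PySem.List.enumerate line).filter (fun p => p.2 != 0)).map (fun p => p.1)
        ++ [(line.length : Int)]
  (PySem.List.max? ((idxs.zip idxs.tail).map (fun p => p.2 - p.1 - 1)) (fun y => y)).getD 0

def longest_zero_path_alt (grid : List (List Int)) : Int :=
  let best : Int := (PySem.List.max? (grid.map maxGapLine) (fun y => y)).getD 0
  (PySem.List.pyRange 0 ((PySem.List.pyGetD grid 0 []).length : Int) 1).foldl
    (fun b c => max b (maxGapLine (grid.map (fun row => PySem.List.pyGetD row c 0)))) best

-- ===== PRECONDITION & SPEC =====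
-- Pre_ excludes exactly the inputs where Python A raises IndexError: the empty grid
-- (len(grid[0])) and grids with some row shorter than the first row (grid[row][col]).
def Pre_longest_zero_path (grid : List (List Int)) : Prop :=
  grid ≠ [] ∧ ∀ r ∈ grid, (grid.headD []).length ≤ r.length
instance (grid : List (List Int)) : Decidable (Pre_longest_zero_path grid) := by
  unfold Pre_longest_zero_path; infer_instance
def pvWitness_longest_zero_path : List (List Int) := [[0, 1], [0, 0]]

def Spec_longest_zero_path (grid : List (List Int)) (out : Int) : Prop := out = longest_zero_path_alt grid
instance (grid : List (List Int)) (out : Int) : Decidable (Spec_longest_zero_path grid out) := by unfold Spec_longest_zero_path; infer_instance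

-- ===== CLAIM (what is proved, stated in full; the proofs are below) =====
def Claim_equal_longest_zero_path : Prop := ∀ (grid : List (List Int)), Dom_longest_zero_path grid → Pre_longest_zero_path grid → Spec_longest_zero_path grid (longest_zero_path grid)

-- ===== LEMMAS AND PROOFS =====

-- A's per-cell step and per-line scan
def stepA (s : Int × Int) (v : Int) : Int × Int :=
  if v = 0 then (s.1 + 1, max s.2 (s.1 + 1)) else (0, s.2)
def scanA (m : Int) (line : List Int) : Int := (line.foldl stepA (0, m)).2

-- the longest zero run of a line, given c zeros immediately preceding it
def G (c : Int) : List Int → Int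
  | [] => c
  | v :: t => if v = 0 then G (c + 1) t else max c (G 0 t)

theorem G_ge (l : List Int) (c : Int) : c ≤ G c l := by
  induction l generalizing c with
  | nil => exact le_refl _
  | cons v t ih =>
    by_cases hv : v = 0
    · simp only [G, hv, if_pos]
      exact le_trans (by omega) (ih (c + 1))
    · simp only [G, hv, ite_false]
      exact le_max_left _ _

theorem foldl_stepA_eq (l : List Int) (c m : Int) (hc : 0 ≤ c) (hcm : c ≤ m) :
    (l.foldl stepA (c, m)).2 = max m (G c l) := by
  induction l generalizing c m with
  | nil => simp only [List.foldl_nil, G]; omega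
  | cons v t ih =>
    by_cases hv : v = 0
    · simp only [List.foldl_cons, stepA, hv, if_pos, G]
      rw [ih (c + 1) (max m (c + 1)) (by omega) (le_max_right _ _)]
      have h1 : c + 1 ≤ G (c + 1) t := G_ge t (c + 1)
      omega
    · simp only [List.foldl_cons, stepA, hv, ite_false, G]
      rw [ih 0 m (le_refl 0) (by omega)]
      have h0 : (0 : Int) ≤ G 0 t := G_ge t 0
      omega

theorem scanA_eq (m : Int) (l : List Int) (hm : 0 ≤ m) : scanA m l = max m (G 0 l) :=
  foldl_stepA_eq l 0 m (le_refl 0) hm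

-- nonzero positions, starting at index i
def nz (i : Int) : List Int → List Int
  | [] => []
  | v :: t => if v = 0 then nz (i + 1) t else i :: nz (i + 1) t

theorem nz_spec (l : List Int) (s : Int) :
    ((PySem.List.enumerate l s).filter (fun p => p.2 != 0)).map (fun p => p.1) = nz s l := by
  induction l generalizing s with
  | nil => rfl
  | cons v t ih =>
    rw [PySem.List.enumerate_cons]
    by_cases hv : v = 0
    · simp only [List.filter_cons, hv, bne_self_eq_false, nz, if_pos]
      exact ih (s + 1)
    · simp only [List.filter_cons, bne_iff_ne, ne_eq, hv, not_false_iff, if_true,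
        List.map_cons, nz, ite_false]
      rw [ih (s + 1)]

-- the gap maximum B computes from an index list
def gapMax (idxs : List Int) : Int :=
  (PySem.List.max? ((idxs.zip idxs.tail).map (fun p => p.2 - p.1 - 1)) (fun y => y)).getD 0

theorem foldl_max_cons (x y : Int) (t : List Int) :
    List.foldl max (max x y) t = max x (List.foldl max y t) := by
  induction t generalizing y with
  | nil => rfl
  | cons z r ih =>
    simp only [List.foldl_cons]
    rw [← ih (max y z), max_assoc]

theorem gapMax_cons (a b : Int) (r : List Int) (hr : r ≠ []) :
    gapMax (a :: b :: r) = max (b - a - 1) (gapMax (b :: r)) := by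
  cases r with
  | nil => exact absurd rfl hr
  | cons c r' =>
    simp only [gapMax, List.zip, List.tail, List.zipWith, List.map_cons,
      PySem.List.max?_id_cons, Option.getD_some, List.foldl_cons]
    rw [foldl_max_cons]

theorem gap_G (l : List Int) (a i : Int) :
    gapMax (a :: (nz i l ++ [i + (l.length : Int)])) = G (i - a - 1) l := by
  induction l generalizing a i with
  | nil =>
    simp only [nz, List.nil_append, List.length_nil, Int.natCast_zero, add_zero, G]
    simp [gapMax, List.zip, List.zipWith, PySem.List.max?_id_cons]
  | cons v t ih =>
    have hlen : i + ((v :: t).length : Int) = (i + 1) + (t.length : Int) := by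
      simp only [List.length_cons]; push_cast; ring
    by_cases hv : v = 0
    · subst hv
      have hlen0 : i + (((0 : Int) :: t).length : Int) = (i + 1) + (t.length : Int) := hlen
      simp only [nz, if_pos, G]
      rw [hlen0, ih a (i + 1)]
      congr 1; ring
    · simp only [nz, hv, ite_false, G]
      rw [hlen, List.cons_append]
      rw [gapMax_cons a i _ (by simp)]
      rw [ih i (i + 1)]
      have h10 : i + 1 - i - 1 = 0 := by ring
      rw [h10]

theorem maxGapLine_eq_G (l : List Int) : maxGapLine l = G 0 l := by
  have h : maxGapLine l = gapMax (-1 :: (nz 0 l ++ [(0 : Int) + (l.length : Int)])) := by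
    simp only [maxGapLine, gapMax, List.cons_append, List.nil_append, nz_spec l 0,
      zero_add]
  rw [h, gap_G l (-1) 0]
  norm_num

theorem G_nonneg (l : List Int) : 0 ≤ G 0 l := G_ge l 0

theorem scanA_eq_max_maxGapLine (m : Int) (l : List Int) (hm : 0 ≤ m) :
    scanA m l = max m (maxGapLine l) := by
  rw [scanA_eq m l hm, maxGapLine_eq_G]

-- A's row pass equals B's max over per-row gap values (grid nonempty)
theorem rows_eq (r : List Int) (t : List (List Int)) :
    (r :: t).foldl scanA 0 = (PySem.List.max? ((r :: t).map maxGapLine) (fun y => y)).getD 0 := by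
  simp only [List.map_cons, PySem.List.max?_id_cons, Option.getD_some, List.foldl_cons]
  have hstart : scanA 0 r = maxGapLine r := by
    rw [scanA_eq_max_maxGapLine 0 r (le_refl 0)]
    have := G_nonneg r
    rw [maxGapLine_eq_G]; omega
  rw [hstart, List.foldl_map]
  have key : ∀ (ls : List (List Int)) (m : Int), 0 ≤ m →
      ls.foldl scanA m = ls.foldl (fun (b : Int) line => max b (maxGapLine line)) m := by
    intro ls
    induction ls with
    | nil => intro m _; rfl
    | cons l ls' ih =>
      intro m hm
      simp only [List.foldl_cons]
      rw [scanA_eq_max_maxGapLine m l hm]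
      exact ih _ (le_trans hm (le_max_left _ _))
  have h0 : (0 : Int) ≤ maxGapLine r := by rw [maxGapLine_eq_G]; exact G_nonneg r
  exact key t (maxGapLine r) h0

-- A's column index-loop over rows, rewritten as a scan of the column list
theorem colScan_eq (grid : List (List Int)) (m col : Int) :
    ((PySem.List.pyRange 0 ((grid.length : Int)) 1).foldl (fun (s : Int × Int) r =>
        if PySem.List.pyGetD (PySem.List.pyGetD grid r []) col 0 = 0
        then (s.1 + 1, max s.2 (s.1 + 1)) else (0, s.2)) ((0 : Int), m)).2
    = scanA m (grid.map (fun row => PySem.List.pyGetD row col 0)) := by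
  have h := PySem.List.foldl_pyRange_zero_pyGetD' grid []
    (fun (s : Int × Int) row => stepA s (PySem.List.pyGetD row col 0)) ((0 : Int), m)
  unfold scanA
  rw [List.foldl_map]
  exact congrArg Prod.snd h

-- ===== VERDICT (by name: the statement is the Claim_ definition above) =====
theorem longest_zero_path_spec : Claim_equal_longest_zero_path := by
  intro grid _ hpre
  obtain ⟨hne, _⟩ := hpre
  unfold Spec_longest_zero_path
  cases grid with
  | nil => exact absurd rfl hne
  | cons r t =>
    show (PySem.List.pyRange 0 ((PySem.List.pyGetD (r :: t) 0 []).length : Int) 1).foldl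
        (fun m col => ((PySem.List.pyRange 0 (((r :: t).length : Int)) 1).foldl
          (fun (s : Int × Int) rr =>
            if PySem.List.pyGetD (PySem.List.pyGetD (r :: t) rr []) col 0 = 0
            then (s.1 + 1, max s.2 (s.1 + 1)) else (0, s.2)) ((0 : Int), m)).2)
        ((r :: t).foldl scanA 0)
      = longest_zero_path_alt (r :: t)
    have hcols : ∀ (cs : List Int) (m : Int), 0 ≤ m →
        cs.foldl (fun m col => ((PySem.List.pyRange 0 (((r :: t).length : Int)) 1).foldl
          (fun (s : Int × Int) rr =>
            if PySem.List.pyGetD (PySem.List.pyGetD (r :: t) rr []) col 0 = 0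
            then (s.1 + 1, max s.2 (s.1 + 1)) else (0, s.2)) ((0 : Int), m)).2) m
        = cs.foldl (fun b col =>
            max b (maxGapLine ((r :: t).map (fun row => PySem.List.pyGetD row col 0)))) m := by
      intro cs
      induction cs with
      | nil => intro m _; rfl
      | cons c cs' ih =>
        intro m hm
        simp only [List.foldl_cons]
        rw [colScan_eq (r :: t) m c, scanA_eq_max_maxGapLine m _ hm]
        exact ih _ (le_trans hm (le_max_left _ _))
    have hm0 : (0 : Int) ≤ (r :: t).foldl scanA 0 := by
      rw [rows_eq]
      simp only [List.map_cons, PySem.List.max?_id_cons, Option.getD_some]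
      have := (PySem.List.le_foldl_max ((t.map maxGapLine)) (maxGapLine r)).1
      have h0 : (0 : Int) ≤ maxGapLine r := by rw [maxGapLine_eq_G]; exact G_nonneg r
      omega
    rw [hcols _ _ hm0, rows_eq r t]
    rfl
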